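-- pv_equiv track=rewrite | github.com/dagsdags212/rosalind | heredity/law_of_segregation.py | get_progeny_count
-- ===== SOURCE A (Python) =====
-- def get_progeny_count(g1, g2):
--     """ Returns a dictionary containing the counts of each possible progeny produced by breeding g1 and g2. """
--     progenies = {}
--     for n in g1:
--         for m in g2:
--             # ensures that the dominant allele goes first
--             genotype = n + m if n < m else m + n
--             if genotype in progenies:
--                 progenies[genotype] += 1
--             else:
--                 progenies[genotype] = 1
--     return progenies
-- ===== SOURCE B (Python) =====
-- def get_progeny_count(g1, g2):
--     """ Returns a dictionary containing the counts of each possible progeny produced by breeding g1 and g2. """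
--     # count alleles once, then combine distinct alleles and multiply frequencies
--     ca = {}
--     for n in g1:
--         ca[n] = ca.get(n, 0) + 1
--     cb = {}
--     for m in g2:
--         cb[m] = cb.get(m, 0) + 1
--     progenies = {}
--     for a, x in ca.items():
--         for b, y in cb.items():
--             genotype = a + b if a < b else b + a
--             progenies[genotype] = progenies.get(genotype, 0) + x * y
--     return progenies
-- ===== Notes on version B (the rewrite author's own statement) =====
-- stated objective: faster
-- what changed: Instead of enumerating every allele pair of g1 x g2 and incrementing a dict, B builds allele frequency tables for each genotype once and combines only the distinct alleles, adding the product of their frequencies per genotype key.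
import Mathlib
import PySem

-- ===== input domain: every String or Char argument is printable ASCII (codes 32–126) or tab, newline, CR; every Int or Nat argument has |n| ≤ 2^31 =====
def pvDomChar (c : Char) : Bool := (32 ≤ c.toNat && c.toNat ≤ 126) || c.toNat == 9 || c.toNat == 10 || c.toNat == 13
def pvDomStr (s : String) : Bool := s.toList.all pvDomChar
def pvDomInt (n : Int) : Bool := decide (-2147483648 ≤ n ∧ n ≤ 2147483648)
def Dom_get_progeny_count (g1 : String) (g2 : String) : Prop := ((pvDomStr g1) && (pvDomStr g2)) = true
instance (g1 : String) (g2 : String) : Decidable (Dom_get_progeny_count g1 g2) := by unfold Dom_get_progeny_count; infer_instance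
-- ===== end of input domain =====

-- B counts each allele of either genotype once and combines the distinct alleles,
-- multiplying the two frequencies, instead of enumerating every allele pair
-- (same return value, including dict insertion order).

-- shared helper: Python's `n + m if n < m else m + n` on single characters
def pvGeno (n m : Char) : String := if n < m then String.ofList [n, m] else String.ofList [m, n]

-- ===== PORT A =====
def get_progeny_count (g1 : String) (g2 : String) : List (String × Int) :=
  (g1.toList.foldl (fun progenies n =>
    g2.toList.foldl (fun progenies m =>
      let genotype := pvGeno n m
      if progenies.contains genotype then
        progenies.insert genotype (progenies.getD genotype 0 + 1)
      else
        progenies.insert genotype 1) progenies) PySem.Dict.empty).items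

-- ===== PORT B =====
def get_progeny_count_alt (g1 : String) (g2 : String) : List (String × Int) :=
  let ca := g1.toList.foldl (fun d n => d.insert n (d.getD n 0 + 1)) PySem.Dict.empty
  let cb := g2.toList.foldl (fun d m => d.insert m (d.getD m 0 + 1)) PySem.Dict.empty
  (ca.items.foldl (fun progenies p =>
    cb.items.foldl (fun progenies q =>
      let genotype := pvGeno p.1 q.1
      progenies.insert genotype (progenies.getD genotype 0 + p.2 * q.2)) progenies)
    PySem.Dict.empty).items

-- ===== PRECONDITION & SPEC =====
def Spec_get_progeny_count (g1 : String) (g2 : String) (out : List (String × Int)) : Prop := out = get_progeny_count_alt g1 g2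
instance (g1 : String) (g2 : String) (out : List (String × Int)) : Decidable (Spec_get_progeny_count g1 g2 out) := by unfold Spec_get_progeny_count; infer_instance

-- ===== CLAIM (what is proved, stated in full; the proofs are below) =====
def Claim_equal_get_progeny_count : Prop := ∀ (g1 : String) (g2 : String), Dom_get_progeny_count g1 g2 → Spec_get_progeny_count g1 g2 (get_progeny_count g1 g2)

-- ===== LEMMAS AND PROOFS =====

theorem pv_keys_insert {κ ν : Type} [BEq κ] [LawfulBEq κ] (d : PySem.Dict κ ν) (k : κ) (v : ν) :
    (d.insert k v).keys = PySem.Set.add d.keys k := by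
  by_cases h : d.contains k = true
  · rw [PySem.Dict.keys_insert_of_contains _ _ h]
    have hm : k ∈ d.keys := (PySem.Dict.contains_iff_mem_keys d k).mp h
    simp [PySem.Set.add, hm]
  · have h' : d.contains k = false := by simpa using h
    rw [PySem.Dict.keys_insert_of_not_contains _ _ h']
    have hm : ¬ k ∈ d.keys := fun hx => h ((PySem.Dict.contains_iff_mem_keys d k).mpr hx)
    simp [PySem.Set.add, hm]

theorem pv_keys_wfold {α : Type} {κ : Type} [BEq κ] [LawfulBEq κ]
    (key : α → κ) (w : α → Int) (l : List α) (d : PySem.Dict κ Int) :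
    (l.foldl (fun d x => d.insert (key x) (d.getD (key x) 0 + w x)) d).keys
      = PySem.Set.update d.keys (l.map key) := by
  induction l generalizing d with
  | nil => simp [PySem.Set.update_nil]
  | cons x t ih =>
      simp only [List.foldl_cons, List.map_cons, PySem.Set.update_cons]
      rw [ih, pv_keys_insert]

theorem pv_getD_wfold {α : Type} {κ : Type} [BEq κ] [LawfulBEq κ] [DecidableEq κ]
    (key : α → κ) (w : α → Int) (l : List α) (d : PySem.Dict κ Int) (j : κ) :
    (l.foldl (fun d x => d.insert (key x) (d.getD (key x) 0 + w x)) d).getD j 0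
      = d.getD j 0 + (l.map (fun x => if key x = j then w x else 0)).sum := by
  induction l generalizing d with
  | nil => simp
  | cons x t ih =>
      simp only [List.foldl_cons, List.map_cons, List.sum_cons]
      rw [ih, PySem.Dict.getD_insert]
      by_cases hj : j = key x
      · subst hj; simp; ring
      · simp [hj, Ne.symm hj]
      
theorem pv_items_wfold {α : Type} {κ : Type} [BEq κ] [LawfulBEq κ] [DecidableEq κ]
    (key : α → κ) (w : α → Int) (l : List α) :
    (l.foldl (fun d x => d.insert (key x) (d.getD (key x) 0 + w x)) PySem.Dict.empty).items
      = (PySem.Set.ofList (l.map key)).map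
          (fun j => (j, (l.map (fun x => if key x = j then w x else 0)).sum)) := by
  have hkeys := pv_keys_wfold key w l PySem.Dict.empty
  rw [PySem.Dict.keys_empty] at hkeys
  have hof : PySem.Set.update ([] : PySem.Set κ) (l.map key) = PySem.Set.ofList (l.map key) := by
    rw [PySem.Set.ofList_eq_foldl]; rfl
  rw [hof] at hkeys
  have hnd : (l.foldl (fun d x => d.insert (key x) (d.getD (key x) 0 + w x)) PySem.Dict.empty).keys.Nodup := by
    rw [hkeys]; exact PySem.Set.nodup_ofList _
  rw [PySem.Dict.items_eq_map_keys _ hnd 0, hkeys]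
  exact List.map_congr_left (fun a ha => by rw [pv_getD_wfold, PySem.Dict.getD_empty, zero_add])

theorem pv_update_append {α : Type} [BEq α] (s : PySem.Set α) (u v : List α) :
    PySem.Set.update s (u ++ v) = PySem.Set.update (PySem.Set.update s u) v := by
  simp [PySem.Set.update, List.foldl_append]

theorem pv_update_of_subset {α : Type} [BEq α] [LawfulBEq α] (s : PySem.Set α) (v : List α)
    (h : ∀ z ∈ v, z ∈ s) : PySem.Set.update s v = s := by
  rw [PySem.Set.update_eq_append_filter]
  have hnil : (PySem.Set.ofList v).filter (fun y => !s.contains y) = [] := by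
    rw [List.filter_eq_nil_iff]
    intro a ha
    have hm : a ∈ s := h a ((PySem.Set.mem_ofList v a).mp ha)
    simpa using hm
  rw [hnil, List.append_nil]

theorem pv_update_discard {α κ : Type} [BEq α] [LawfulBEq α] [BEq κ] [LawfulBEq κ]
    (f : α → List κ) (x : α) (u : List α) (s : PySem.Set κ)
    (h : ∀ z ∈ f x, z ∈ s) :
    PySem.Set.update s ((u.filter (fun y => !(y == x))).flatMap f)
      = PySem.Set.update s (u.flatMap f) := by
  induction u generalizing s with
  | nil => rfl
  | cons y t ih =>
      by_cases hy : y = x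
      · subst hy
        have hf : ((y :: t).filter (fun z => !(z == y))) = t.filter (fun z => !(z == y)) := by
          simp
        rw [hf, List.flatMap_cons, pv_update_append, pv_update_of_subset s (f y) h]
        exact ih s h
      · have hf : ((y :: t).filter (fun z => !(z == x))) = y :: t.filter (fun z => !(z == x)) := by
          simp [hy]
        rw [hf, List.flatMap_cons, List.flatMap_cons, pv_update_append, pv_update_append]
        exact ih (PySem.Set.update s (f y)) (fun z hz => (PySem.Set.mem_update _ _ _).mpr (Or.inl (h z hz)))

theorem pv_ofList_flatMap_ofList {α κ : Type} [BEq α] [LawfulBEq α] [BEq κ] [LawfulBEq κ]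
    (f : α → List κ) (xs : List α) (s : PySem.Set κ) :
    PySem.Set.update s ((PySem.Set.ofList xs).flatMap f) = PySem.Set.update s (xs.flatMap f) := by
  induction xs generalizing s with
  | nil => rfl
  | cons x t ih =>
      rw [PySem.Set.ofList_cons, List.flatMap_cons, List.flatMap_cons,
          pv_update_append, pv_update_append]
      have hd : (PySem.Set.ofList t).discard x = (PySem.Set.ofList t).filter (fun y => !(y == x)) := rfl
      rw [hd, pv_update_discard f x (PySem.Set.ofList t) (PySem.Set.update s (f x))
            (fun z hz => (PySem.Set.mem_update _ _ _).mpr (Or.inr hz))]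
      exact ih (PySem.Set.update s (f x))

theorem pv_update_congr {α : Type} [BEq α] [LawfulBEq α] (s : PySem.Set α) (v v' : List α)
    (h : PySem.Set.ofList v = PySem.Set.ofList v') : PySem.Set.update s v = PySem.Set.update s v' := by
  rw [PySem.Set.update_eq_append_filter, PySem.Set.update_eq_append_filter, h]

theorem pv_ofList_flatMap_congr {α κ : Type} [BEq α] [BEq κ] [LawfulBEq κ]
    (f f' : α → List κ) (xs : List α) (s : PySem.Set κ)
    (h : ∀ a ∈ xs, PySem.Set.ofList (f a) = PySem.Set.ofList (f' a)) :
    PySem.Set.update s (xs.flatMap f) = PySem.Set.update s (xs.flatMap f') := by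
  induction xs generalizing s with
  | nil => rfl
  | cons x t ih =>
      rw [List.flatMap_cons, List.flatMap_cons, pv_update_append, pv_update_append,
          pv_update_congr s (f x) (f' x) (h x List.mem_cons_self)]
      exact ih _ (fun a ha => h a (List.mem_cons_of_mem _ ha))

theorem pv_nodup_sum_filter {α : Type} [BEq α] [LawfulBEq α] (u : List α) (hu : u.Nodup)
    (x : α) (F : α → Int) :
    (u.map F).sum = ((u.filter (fun a => !(a == x))).map F).sum + (if x ∈ u then F x else 0) := by
  induction u with
  | nil => simp
  | cons y t ih =>
      have hy : y ∉ t := (List.nodup_cons.mp hu).1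
      have ht : t.Nodup := (List.nodup_cons.mp hu).2
      by_cases hyx : y = x
      · subst hyx
        have hf : ((y :: t).filter (fun a => !(a == y))) = t := by
          have h1 : ((y :: t).filter (fun a => !(a == y))) = t.filter (fun a => !(a == y)) := by simp
          rw [h1]
          apply List.filter_eq_self.mpr
          intro a ha
          have hne : a ≠ y := fun hEq => hy (hEq ▸ ha)
          simp [hne]
        rw [hf]
        simp only [List.map_cons, List.sum_cons]
        rw [if_pos List.mem_cons_self]
        ring
      · have hf : ((y :: t).filter (fun a => !(a == x))) = y :: t.filter (fun a => !(a == x)) := by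
          simp [hyx]
        rw [hf]
        simp only [List.map_cons, List.sum_cons]
        rw [ih ht]
        have hx : (x ∈ y :: t) ↔ x ∈ t := by
          rw [List.mem_cons]
          exact or_iff_right (fun hEq => hyx hEq.symm)
        simp only [hx]
        ring

theorem pv_sum_dedup {α : Type} [BEq α] [LawfulBEq α] (l : List α) (h : α → Int) :
    ((PySem.Set.ofList l).map (fun a => (l.count a : Int) * h a)).sum = (l.map h).sum := by
  induction l with
  | nil => simp [PySem.Set.ofList]
  | cons x t ih =>
      rw [PySem.Set.ofList_cons]
      simp only [List.map_cons, List.sum_cons]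
      have hcx : ((x :: t).count x : Int) = (t.count x : Int) + 1 := by
        rw [List.count_cons_self]; push_cast; ring
      have hdisc : ((PySem.Set.ofList t).discard x).map (fun a => ((x :: t).count a : Int) * h a)
          = ((PySem.Set.ofList t).discard x).map (fun a => ((t.count a : Int)) * h a) := by
        apply List.map_congr_left
        intro a ha
        have hax : a ≠ x := ((PySem.Set.mem_discard _ _ _).mp ha).2
        have hne : (x == a) = false := beq_eq_false_iff_ne.mpr (Ne.symm hax)
        simp [List.count_cons, hne]
      rw [hdisc, hcx]
      have hfil : (PySem.Set.ofList t).discard x = (PySem.Set.ofList t).filter (fun a => !(a == x)) := rfl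
      have hsplit := pv_nodup_sum_filter (PySem.Set.ofList t) (PySem.Set.nodup_ofList t) x
        (fun a => ((t.count a : Int)) * h a)
      rw [ih] at hsplit
      have hterm : (if x ∈ PySem.Set.ofList t then ((t.count x : Int)) * h x else 0)
          = (t.count x : Int) * h x := by
        by_cases hxt : x ∈ t
        · rw [if_pos ((PySem.Set.mem_ofList t x).mpr hxt)]
        · rw [if_neg (fun hc => hxt ((PySem.Set.mem_ofList t x).mp hc))]
          rw [List.count_eq_zero_of_not_mem hxt]; simp
      rw [hterm] at hsplit
      rw [hfil]
      have hrw : ((((PySem.Set.ofList t).filter (fun a => !(a == x))).map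
          (fun a => ((t.count a : Int)) * h a)).sum) = (t.map h).sum - (t.count x : Int) * h x := by
        omega
      rw [hrw]
      ring

theorem pv_sum_ite_count {α κ : Type} [BEq κ] [LawfulBEq κ] [DecidableEq κ]
    (u : List α) (g : α → κ) (j : κ) :
    (u.map (fun m => if g m = j then (1 : Int) else 0)).sum = ((u.map g).count j : Int) := by
  induction u with
  | nil => simp
  | cons y t ih =>
      simp only [List.map_cons, List.sum_cons, List.count_cons]
      rw [ih]
      by_cases hg : g y = j
      · simp [hg]; omega
      · have hb : (g y == j) = false := beq_eq_false_iff_ne.mpr hg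
        simp [hg, hb]

theorem pv_sum_flatMap' {α : Type} (l : List α) (f : α → List Int) :
    (l.flatMap f).sum = (l.map (fun a => (f a).sum)).sum := by
  induction l with
  | nil => simp
  | cons x t ih => simp [List.flatMap_cons, List.sum_append, ih]

-- A computes the items of the plain counter of the flattened genotype list
theorem pv_A_eq (g1 g2 : String) :
    get_progeny_count g1 g2
      = (PySem.Set.ofList (g1.toList.flatMap (fun n => g2.toList.map (fun m => pvGeno n m)))).map
          (fun j => (j, (List.count j (g1.toList.flatMap (fun n => g2.toList.map (fun m => pvGeno n m))) : Int))) := by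
  unfold get_progeny_count
  show (g1.toList.foldl (fun progenies n =>
    g2.toList.foldl (fun progenies m =>
      if progenies.contains (pvGeno n m) then
        progenies.insert (pvGeno n m) (progenies.getD (pvGeno n m) 0 + 1)
      else
        progenies.insert (pvGeno n m) 1) progenies) (PySem.Dict.empty : PySem.Dict String Int)).items = _
  have hflat : (g1.toList.foldl (fun progenies n =>
      g2.toList.foldl (fun progenies m =>
        if progenies.contains (pvGeno n m) then
          progenies.insert (pvGeno n m) (progenies.getD (pvGeno n m) 0 + 1)
        else
          progenies.insert (pvGeno n m) 1) progenies) (PySem.Dict.empty : PySem.Dict String Int))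
      = (g1.toList.flatMap (fun n => g2.toList.map (fun m => pvGeno n m))).foldl
          (fun d k => if d.contains k then d.insert k (d.getD k 0 + 1) else d.insert k 1)
          PySem.Dict.empty := by
    rw [List.foldl_flatMap]
    congr 1
    funext d n
    rw [List.foldl_map]
  rw [hflat]
  have hstep : (fun (d : PySem.Dict String Int) k =>
      if d.contains k then d.insert k (d.getD k 0 + 1) else d.insert k 1)
      = fun (d : PySem.Dict String Int) k => d.insert k (d.getD k 0 + 1) := by
    funext d k
    by_cases hc : d.contains k = true
    · rw [if_pos hc]
    · have hc' : d.contains k = false := by simpa using hc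
      rw [if_neg (by simp [hc']), PySem.Dict.getD_of_not_contains d 0 hc', zero_add]
  rw [hstep, PySem.Dict.foldl_insert_getD_add_one_eq_counter, PySem.Dict.items_counter]

-- B computes the items of the weighted fold over the item pairs of the two allele counters
theorem pv_B_eq (g1 g2 : String) :
    get_progeny_count_alt g1 g2
      = (let P := (PySem.Dict.counter g1.toList).items.flatMap
            (fun p => (PySem.Dict.counter g2.toList).items.map (fun q => (p, q)))
         (PySem.Set.ofList (P.map (fun pq => pvGeno pq.1.1 pq.2.1))).map
          (fun j => (j, (P.map (fun pq => if pvGeno pq.1.1 pq.2.1 = j then pq.1.2 * pq.2.2 else 0)).sum))) := by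
  unfold get_progeny_count_alt
  rw [PySem.Dict.foldl_insert_getD_add_one_eq_counter, PySem.Dict.foldl_insert_getD_add_one_eq_counter]
  show ((PySem.Dict.counter g1.toList).items.foldl (fun progenies p =>
      (PySem.Dict.counter g2.toList).items.foldl (fun progenies q =>
        progenies.insert (pvGeno p.1 q.1) (progenies.getD (pvGeno p.1 q.1) 0 + p.2 * q.2)) progenies)
      PySem.Dict.empty).items = _
  have hflat : ((PySem.Dict.counter g1.toList).items.foldl (fun progenies p =>
      (PySem.Dict.counter g2.toList).items.foldl (fun progenies q =>
        progenies.insert (pvGeno p.1 q.1) (progenies.getD (pvGeno p.1 q.1) 0 + p.2 * q.2)) progenies)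
      PySem.Dict.empty)
      = (((PySem.Dict.counter g1.toList).items.flatMap
            (fun p => (PySem.Dict.counter g2.toList).items.map (fun q => (p, q)))).foldl
          (fun d pq => d.insert (pvGeno pq.1.1 pq.2.1) (d.getD (pvGeno pq.1.1 pq.2.1) 0 + pq.1.2 * pq.2.2))
          PySem.Dict.empty) := by
    rw [List.foldl_flatMap]
    congr 1
    funext d p
    rw [List.foldl_map]
  rw [hflat]
  exact pv_items_wfold (fun pq => pvGeno pq.1.1 pq.2.1)
    (fun pq : (Char × Int) × (Char × Int) => pq.1.2 * pq.2.2) _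

theorem pv_ofList_update_nil {α : Type} [BEq α] (v : List α) :
    PySem.Set.ofList v = PySem.Set.update [] v := by
  rw [PySem.Set.ofList_eq_foldl]; rfl

theorem pv_ofList_flatMap_ofList' {α κ : Type} [BEq α] [LawfulBEq α] [BEq κ] [LawfulBEq κ]
    (f : α → List κ) (xs : List α) :
    PySem.Set.ofList ((PySem.Set.ofList xs).flatMap f) = PySem.Set.ofList (xs.flatMap f) :=
  calc
    PySem.Set.ofList ((PySem.Set.ofList xs).flatMap f)
        = PySem.Set.update [] ((PySem.Set.ofList xs).flatMap f) := pv_ofList_update_nil _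
    _ = PySem.Set.update [] (xs.flatMap f) := pv_ofList_flatMap_ofList f xs []
    _ = PySem.Set.ofList (xs.flatMap f) := (pv_ofList_update_nil _).symm

theorem pv_ofList_flatMap_congr' {α κ : Type} [BEq α] [BEq κ] [LawfulBEq κ]
    (f f' : α → List κ) (xs : List α)
    (h : ∀ a ∈ xs, PySem.Set.ofList (f a) = PySem.Set.ofList (f' a)) :
    PySem.Set.ofList (xs.flatMap f) = PySem.Set.ofList (xs.flatMap f') :=
  calc
    PySem.Set.ofList (xs.flatMap f) = PySem.Set.update [] (xs.flatMap f) := pv_ofList_update_nil _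
    _ = PySem.Set.update [] (xs.flatMap f') := pv_ofList_flatMap_congr f f' xs [] h
    _ = PySem.Set.ofList (xs.flatMap f') := (pv_ofList_update_nil _).symm

-- the two genotype key lists have the same ordered dedup
theorem pv_keys_agree (g1 g2 : String) :
    PySem.Set.ofList
      (((PySem.Dict.counter g1.toList).items.flatMap
          (fun p => (PySem.Dict.counter g2.toList).items.map (fun q => (p, q)))).map
        (fun pq => pvGeno pq.1.1 pq.2.1))
      = PySem.Set.ofList (g1.toList.flatMap (fun n => g2.toList.map (fun m => pvGeno n m))) := by
  have h0 : (((PySem.Dict.counter g1.toList).items.flatMap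
      (fun p => (PySem.Dict.counter g2.toList).items.map (fun q => (p, q)))).map
        (fun pq => pvGeno pq.1.1 pq.2.1))
      = (PySem.Set.ofList g1.toList).flatMap
          (fun a => (PySem.Set.ofList g2.toList).map (fun b => pvGeno a b)) := by
    rw [PySem.Dict.items_counter, PySem.Dict.items_counter]
    simp [List.map_flatMap, List.flatMap_map, List.map_map, Function.comp_def]
  rw [h0]
  calc
    PySem.Set.ofList ((PySem.Set.ofList g1.toList).flatMap
        (fun a => (PySem.Set.ofList g2.toList).map (fun b => pvGeno a b)))
        = PySem.Set.ofList ((PySem.Set.ofList g1.toList).flatMap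
            (fun a => g2.toList.map (fun b => pvGeno a b))) := by
          apply pv_ofList_flatMap_congr'
          intro a _
          calc
            PySem.Set.ofList ((PySem.Set.ofList g2.toList).map (fun b => pvGeno a b))
                = PySem.Set.ofList ((PySem.Set.ofList g2.toList).flatMap (fun b => [pvGeno a b])) := by
                  rw [← List.map_eq_flatMap]
            _ = PySem.Set.ofList (g2.toList.flatMap (fun b => [pvGeno a b])) :=
                  pv_ofList_flatMap_ofList' (fun b => [pvGeno a b]) g2.toList
            _ = PySem.Set.ofList (g2.toList.map (fun b => pvGeno a b)) := by
                  rw [← List.map_eq_flatMap]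
    _ = PySem.Set.ofList (g1.toList.flatMap (fun a => g2.toList.map (fun b => pvGeno a b))) :=
          pv_ofList_flatMap_ofList' (fun a => g2.toList.map (fun b => pvGeno a b)) g1.toList

-- the weighted sums compute the pair counts
theorem pv_vals_agree (g1 g2 : String) (j : String) :
    (((PySem.Dict.counter g1.toList).items.flatMap
        (fun p => (PySem.Dict.counter g2.toList).items.map (fun q => (p, q)))).map
      (fun pq => if pvGeno pq.1.1 pq.2.1 = j then pq.1.2 * pq.2.2 else 0)).sum
      = (List.count j (g1.toList.flatMap (fun n => g2.toList.map (fun m => pvGeno n m))) : Int) := by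
  have h0 : (((PySem.Dict.counter g1.toList).items.flatMap
      (fun p => (PySem.Dict.counter g2.toList).items.map (fun q => (p, q)))).map
        (fun pq => if pvGeno pq.1.1 pq.2.1 = j then pq.1.2 * pq.2.2 else 0))
      = (PySem.Set.ofList g1.toList).flatMap
          (fun a => (PySem.Set.ofList g2.toList).map
            (fun b => if pvGeno a b = j
              then (List.count a g1.toList : Int) * (List.count b g2.toList : Int) else 0)) := by
    rw [PySem.Dict.items_counter, PySem.Dict.items_counter]
    simp [List.map_flatMap, List.flatMap_map, List.map_map, Function.comp_def]
  rw [h0, pv_sum_flatMap']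
  have hinner : ∀ a : Char,
      ((PySem.Set.ofList g2.toList).map
        (fun b => if pvGeno a b = j
          then (List.count a g1.toList : Int) * (List.count b g2.toList : Int) else 0)).sum
      = (List.count a g1.toList : Int) * (List.count j (g2.toList.map (fun m => pvGeno a m)) : Int) := by
    intro a
    have hcongr : ((PySem.Set.ofList g2.toList).map
        (fun b => if pvGeno a b = j
          then (List.count a g1.toList : Int) * (List.count b g2.toList : Int) else 0))
        = ((PySem.Set.ofList g2.toList).map
            (fun b => (List.count b g2.toList : Int) *
              ((List.count a g1.toList : Int) * (if pvGeno a b = j then (1 : Int) else 0)))) := by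
      apply List.map_congr_left
      intro b _
      split_ifs <;> ring
    rw [hcongr, pv_sum_dedup g2.toList
      (fun b => (List.count a g1.toList : Int) * (if pvGeno a b = j then (1 : Int) else 0))]
    rw [List.sum_map_mul_left, pv_sum_ite_count g2.toList (fun m => pvGeno a m) j]
  have hmap : ((PySem.Set.ofList g1.toList).map
      (fun a => ((PySem.Set.ofList g2.toList).map
        (fun b => if pvGeno a b = j
          then (List.count a g1.toList : Int) * (List.count b g2.toList : Int) else 0)).sum))
      = ((PySem.Set.ofList g1.toList).map
          (fun a => (List.count a g1.toList : Int) *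
            (List.count j (g2.toList.map (fun m => pvGeno a m)) : Int))) :=
    List.map_congr_left (fun a _ => hinner a)
  rw [hmap, pv_sum_dedup g1.toList
    (fun a => (List.count j (g2.toList.map (fun m => pvGeno a m)) : Int))]
  rw [List.count_flatMap]
  rw [Nat.cast_list_sum, List.map_map]
  rfl

-- ===== VERDICT (by name: the statement is the Claim_ definition above) =====
theorem get_progeny_count_spec : Claim_equal_get_progeny_count := by
  intro g1 g2 _
  unfold Spec_get_progeny_count
  rw [pv_A_eq, pv_B_eq]
  show _ = List.map _ (PySem.Set.ofList _)
  rw [pv_keys_agree]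
  apply List.map_congr_left
  intro j _
  rw [pv_vals_agree]
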